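-- pv_equiv track=rewrite | github.com/dansteeves68/advent-of-code-2023 | 14/foo.py | tilted
-- ===== SOURCE A (Python) =====
-- def tilted(rocks: str) -> str:
--     result = ""
--     rounds = ""
--     dots = ""
--     for rock in rocks:
--         if rock == "#":
--             result += rounds
--             result += dots
--             result += "#"
--             rounds = ""
--             dots = ""
--         elif rock == "O":
--             rounds += "O"
--         elif rock == ".":
--             dots += "."
--     result += rounds
--     result += dots
--     return result
-- ===== SOURCE B (Python) =====
-- def tilted(rocks: str) -> str:
--     return "#".join(
--         "O" * s.count("O") + "." * s.count(".") for s in rocks.split("#")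
--     )
-- ===== Notes on version B (the rewrite author's own statement) =====
-- stated objective: simpler
-- what changed: Replaces the char-by-char scan with three flush-on-sentinel string accumulators by a one-line split-on-sentinel / count-and-rebuild-each-segment / join decomposition; avoiding repeated string += also makes it measurably faster.
import Mathlib
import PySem

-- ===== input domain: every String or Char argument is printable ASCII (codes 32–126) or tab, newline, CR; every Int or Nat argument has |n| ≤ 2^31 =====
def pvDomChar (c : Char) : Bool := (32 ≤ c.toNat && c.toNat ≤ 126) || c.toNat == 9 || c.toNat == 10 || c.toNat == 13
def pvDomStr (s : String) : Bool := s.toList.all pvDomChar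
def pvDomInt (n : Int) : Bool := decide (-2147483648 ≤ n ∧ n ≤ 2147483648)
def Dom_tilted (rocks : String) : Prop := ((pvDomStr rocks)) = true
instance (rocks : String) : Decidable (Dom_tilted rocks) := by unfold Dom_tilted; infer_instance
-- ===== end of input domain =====

-- B replaces A's char-by-char pass with three accumulators by a split-on-sentinel /
-- rebuild-each-segment / join decomposition (objective: simpler).

-- ===== PORT A =====
-- the for-loop over `rocks` with its three string accumulators, branch for branch
def tiltedGo : List Char → List Char → List Char → List Char → List Char
  | [], result, rounds, dots => result ++ rounds ++ dots
  | rock :: rest, result, rounds, dots =>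
    if rock = '#' then tiltedGo rest (result ++ rounds ++ dots ++ ['#']) [] []
    else if rock = 'O' then tiltedGo rest result (rounds ++ ['O']) dots
    else if rock = '.' then tiltedGo rest result rounds (dots ++ ['.'])
    else tiltedGo rest result rounds dots

def tilted (rocks : String) : String :=
  String.ofList (tiltedGo rocks.toList [] [] [])

-- ===== PORT B =====
-- "O" * s.count("O") + "." * s.count(".")  (str.count of a single char = list count)
def segTilt (s : List Char) : List Char :=
  List.replicate (s.count 'O') 'O' ++ List.replicate (s.count '.') '.'

-- "#".join(... for s in rocks.split("#"))  (split on the single char '#' = List.splitOn)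
def tilted_alt (rocks : String) : String :=
  String.ofList (PySem.Chars.join ['#'] ((rocks.toList.splitOn '#').map segTilt))

-- ===== PRECONDITION & SPEC =====
def Spec_tilted (rocks : String) (out : String) : Prop := out = tilted_alt rocks
instance (rocks : String) (out : String) : Decidable (Spec_tilted rocks out) := by unfold Spec_tilted; infer_instance

-- ===== CLAIM (what is proved, stated in full; the proofs are below) =====
def Claim_equal_tilted : Prop := ∀ (rocks : String), Dom_tilted rocks → Spec_tilted rocks (tilted rocks)

-- ===== LEMMAS AND PROOFS =====

-- the `result` accumulator is a pure prefix of the loop's output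
lemma tiltedGo_prefix (cs : List Char) : ∀ res rnd dts,
    tiltedGo cs res rnd dts = res ++ tiltedGo cs [] rnd dts := by
  induction cs with
  | nil => intro res rnd dts; simp [tiltedGo]
  | cons c cs ih =>
    intro res rnd dts
    simp only [tiltedGo]
    split_ifs with h1 h2 h3
    · rw [ih (res ++ rnd ++ dts ++ ['#']), ih ([] ++ rnd ++ dts ++ ['#'])]; simp
    · rw [ih]
    · rw [ih]
    · rw [ih]

-- the loop, started with `a` pending 'O's and `b` pending '.'s, produces B's
-- first rebuilt segment (with those extras counted in) joined to the rest
lemma tiltedGo_eq_join (cs : List Char) : ∀ (a b : Nat) (s : List Char) (rest : List (List Char)),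
    cs.splitOn '#' = s :: rest →
    tiltedGo cs [] (List.replicate a 'O') (List.replicate b '.') =
      PySem.Chars.join ['#']
        ((List.replicate (a + s.count 'O') 'O' ++ List.replicate (b + s.count '.') '.')
          :: rest.map segTilt) := by
  induction cs with
  | nil =>
    intro a b s rest h
    simp only [List.splitOn, List.splitOnP_nil] at h
    cases h
    simp [tiltedGo, PySem.Chars.join_singleton]
  | cons c cs ih =>
    intro a b s rest h
    obtain ⟨s0, rest0, hsplit⟩ : ∃ s0 rest0, cs.splitOn '#' = s0 :: rest0 := by
      rcases hcs : cs.splitOn '#' with _ | ⟨s0, rest0⟩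
      · exact absurd hcs (List.splitOnP_ne_nil _ _)
      · exact ⟨s0, rest0, rfl⟩
    simp only [tiltedGo]
    split_ifs with hA hB hC
    · -- rock == "#": flush rounds ++ dots ++ "#", restart with empty accumulators
      subst hA
      have hh : ('#' :: cs).splitOn '#' = [] :: cs.splitOn '#' := by
        simp [List.splitOn, List.splitOnP_cons]
      rw [hh] at h
      injection h with hs hrest
      subst hs; subst hrest
      rw [tiltedGo_prefix]
      have := ih 0 0 s0 rest0 hsplit
      simp only [List.replicate] at this
      rw [this, hsplit]
      simp only [List.map_cons, List.count_nil, Nat.add_zero, Nat.zero_add]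
      rw [PySem.Chars.join_cons_cons]
      simp [segTilt]
    · -- rock == "O": one more pending round rock
      subst hB
      have hh : ('O' :: cs).splitOn '#' = ('O' :: s0) :: rest0 := by
        simp only [List.splitOn, List.splitOnP_cons]
        rw [if_neg (by decide)]
        simp only [List.splitOn] at hsplit
        rw [hsplit]; rfl
      rw [hh] at h
      injection h with hs hrest
      subst hs; subst hrest
      rw [← List.replicate_succ', ih (a + 1) b s0 rest0 hsplit]
      simp
      ring_nf
    · -- rock == ".": one more pending dot
      subst hC
      have hh : ('.' :: cs).splitOn '#' = ('.' :: s0) :: rest0 := by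
        simp only [List.splitOn, List.splitOnP_cons]
        rw [if_neg (by decide)]
        simp only [List.splitOn] at hsplit
        rw [hsplit]; rfl
      rw [hh] at h
      injection h with hs hrest
      subst hs; subst hrest
      rw [← List.replicate_succ', ih a (b + 1) s0 rest0 hsplit]
      simp
      ring_nf
    · -- any other character is dropped
      have hh : (c :: cs).splitOn '#' = (c :: s0) :: rest0 := by
        simp only [List.splitOn, List.splitOnP_cons]
        rw [if_neg (by simp [hA])]
        simp only [List.splitOn] at hsplit
        rw [hsplit]; rfl
      rw [hh] at h
      injection h with hs hrest
      subst hs; subst hrest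
      rw [ih a b s0 rest0 hsplit]
      simp [hB, hC]

-- ===== VERDICT (by name: the statement is the Claim_ definition above) =====
theorem tilted_spec : Claim_equal_tilted := by
  intro rocks _
  unfold Spec_tilted tilted tilted_alt
  obtain ⟨s, rest, hsplit⟩ : ∃ s rest, rocks.toList.splitOn '#' = s :: rest := by
    rcases hcs : rocks.toList.splitOn '#' with _ | ⟨s, rest⟩
    · exact absurd hcs (List.splitOnP_ne_nil _ _)
    · exact ⟨s, rest, rfl⟩
  have := tiltedGo_eq_join rocks.toList 0 0 s rest hsplit
  simp only [List.replicate] at this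
  rw [this, hsplit]
  simp [segTilt]
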